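-- pv_equiv track=rewrite | github.com/Denwiliusz27/Python-zadania | Zestaw_8/Zadanie_1/zad_1.py | create_list_of_vertices
-- ===== SOURCE A (Python) =====
-- def create_list_of_vertices(wierzcholki, a):
--     w_nieodwiedzone = [a]
--     pos_a = 0
--     help_list = list()
--     jest_a = False
--
--     for i in wierzcholki:
--         if i == a:
--             help_list.append(i)
--             break
--         else:
--             help_list.append(i)
--         pos_a += 1
--
--     for i in wierzcholki:
--         if jest_a == False:
--             if i == a:
--                 jest_a = True
--         else:
--             w_nieodwiedzone.append(i)
--
--     return w_nieodwiedzone, help_list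
-- ===== SOURCE B (Python) =====
-- def create_list_of_vertices(wierzcholki, a):
--     lst = list(wierzcholki)
--     idx = None
--     for k, v in enumerate(lst):
--         if v == a:
--             idx = k
--             break
--     if idx is None:
--         return [a], lst
--     return [a] + lst[idx + 1:], lst[:idx + 1]
-- ===== Notes on version B (the rewrite author's own statement) =====
-- stated objective: simpler
-- what changed: B finds the index of the first occurrence of a once and builds both results by prefix/suffix slicing, instead of A's two separate incremental append loops (one with break, one with a boolean flag).
import Mathlib
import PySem

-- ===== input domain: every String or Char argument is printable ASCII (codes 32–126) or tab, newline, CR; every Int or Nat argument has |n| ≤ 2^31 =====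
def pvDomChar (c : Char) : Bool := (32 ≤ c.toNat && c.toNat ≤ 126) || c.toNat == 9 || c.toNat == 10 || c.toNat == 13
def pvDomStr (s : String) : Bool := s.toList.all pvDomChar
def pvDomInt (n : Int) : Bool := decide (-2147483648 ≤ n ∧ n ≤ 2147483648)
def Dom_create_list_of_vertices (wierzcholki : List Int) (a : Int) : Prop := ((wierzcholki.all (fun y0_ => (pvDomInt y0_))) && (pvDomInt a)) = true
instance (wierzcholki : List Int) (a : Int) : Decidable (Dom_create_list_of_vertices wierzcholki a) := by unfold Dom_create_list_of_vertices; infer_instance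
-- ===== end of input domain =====

-- B replaces A's two incremental append loops by one index scan plus prefix/suffix slicing (objective: simpler).

-- ===== PORT A =====
-- first loop of A: append each i, stop (break) after appending the first i == a
def pvHelpLoop (wierzcholki : List Int) (a : Int) : List Int :=
  match wierzcholki with
  | [] => []
  | i :: rest => if i = a then [i] else i :: pvHelpLoop rest a

-- second loop of A: flag jest_a; once the first a is seen, append every later element
def pvTailLoop (wierzcholki : List Int) (a : Int) (jest_a : Bool) : List Int :=
  match wierzcholki with
  | [] => []
  | i :: rest =>
      if jest_a = false then
        if i = a then pvTailLoop rest a true else pvTailLoop rest a false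
      else i :: pvTailLoop rest a jest_a

def create_list_of_vertices (wierzcholki : List Int) (a : Int) : List Int × List Int :=
  (a :: pvTailLoop wierzcholki a false, pvHelpLoop wierzcholki a)

-- ===== PORT B =====
def create_list_of_vertices_alt (wierzcholki : List Int) (a : Int) : List Int × List Int :=
  match PySem.List.index? wierzcholki a with
  | none => ([a], wierzcholki)
  | some idx =>
      (a :: PySem.List.slice wierzcholki (some ((idx : Int) + 1)) none,
       PySem.List.slice wierzcholki none (some ((idx : Int) + 1)))

-- ===== PRECONDITION & SPEC =====
def Spec_create_list_of_vertices (wierzcholki : List Int) (a : Int) (out : List Int × List Int) : Prop := out = create_list_of_vertices_alt wierzcholki a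
instance (wierzcholki : List Int) (a : Int) (out : List Int × List Int) : Decidable (Spec_create_list_of_vertices wierzcholki a out) := by unfold Spec_create_list_of_vertices; infer_instance

-- ===== CLAIM (what is proved, stated in full; the proofs are below) =====
def Claim_equal_create_list_of_vertices : Prop := ∀ (wierzcholki : List Int) (a : Int), Dom_create_list_of_vertices wierzcholki a → Spec_create_list_of_vertices wierzcholki a (create_list_of_vertices wierzcholki a)

-- ===== LEMMAS AND PROOFS =====

lemma pvHelpLoop_eq_take (wierzcholki : List Int) (a : Int) :
    pvHelpLoop wierzcholki a =
      match PySem.List.index? wierzcholki a with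
      | none => wierzcholki
      | some idx => wierzcholki.take (idx + 1) := by
  induction wierzcholki with
  | nil => simp [pvHelpLoop, PySem.List.index?]
  | cons x rest ih =>
    by_cases hx : x = a
    · subst hx
      rw [PySem.List.index?_cons_self]
      simp [pvHelpLoop]
    · rw [PySem.List.index?_cons_of_ne rest hx]
      simp only [pvHelpLoop, if_neg hx, ih]
      cases PySem.List.index? rest a with
      | none => simp
      | some k => simp [List.take_succ_cons]

lemma pvTailLoop_true_eq (wierzcholki : List Int) (a : Int) :
    pvTailLoop wierzcholki a true = wierzcholki := by
  induction wierzcholki with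
  | nil => rfl
  | cons x rest ih => simp [pvTailLoop, ih]

lemma pvTailLoop_eq_drop (wierzcholki : List Int) (a : Int) :
    pvTailLoop wierzcholki a false =
      match PySem.List.index? wierzcholki a with
      | none => []
      | some idx => wierzcholki.drop (idx + 1) := by
  induction wierzcholki with
  | nil => simp [pvTailLoop, PySem.List.index?]
  | cons x rest ih =>
    by_cases hx : x = a
    · subst hx
      rw [PySem.List.index?_cons_self]
      simp [pvTailLoop, pvTailLoop_true_eq]
    · rw [PySem.List.index?_cons_of_ne rest hx]
      simp only [pvTailLoop, if_neg hx, ih]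
      cases PySem.List.index? rest a with
      | none => simp
      | some k => simp [List.drop_succ_cons]

-- ===== VERDICT (by name: the statement is the Claim_ definition above) =====
theorem create_list_of_vertices_spec : Claim_equal_create_list_of_vertices := by
  intro wierzcholki a _
  unfold Spec_create_list_of_vertices create_list_of_vertices create_list_of_vertices_alt
  rw [pvHelpLoop_eq_take, pvTailLoop_eq_drop]
  cases h : PySem.List.index? wierzcholki a with
  | none => rfl
  | some idx =>
    have h1 : PySem.List.slice wierzcholki (some ((idx : Int) + 1)) none = wierzcholki.drop (idx + 1) := by
      have := PySem.List.slice_from_natCast wierzcholki (idx + 1)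
      simpa using this
    have h2 : PySem.List.slice wierzcholki none (some ((idx : Int) + 1)) = wierzcholki.take (idx + 1) := by
      have := PySem.List.slice_to_natCast wierzcholki (idx + 1)
      simpa using this
    simp [h1, h2]
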